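-- pv_equiv track=rewrite | github.com/lowkeyshift/rockitchef | old_code/single_thread_crawler/test.py | process_pos
-- ===== SOURCE A (Python) =====
-- MAPPER = {}
--
-- def order_array(array):
--   holder = []
--   temp = {'pos' : None, 'array':[]}
--   for instance in array:
--     if instance[1] != temp['pos']:
--       holder.append(temp)
--       temp = {'pos' : instance[1], 'array':[instance[0]]}
--     else:
--       temp['array'].append(instance[0])
--   holder.append(temp)
--   return holder[1:]
--
-- def process_pos(array):
--   if len(array) == 1:
--     return None, array[0]
--   if len(array) == 2:
--     return array[0], array[1]
--   else:
--     pos_pieces = order_array(array)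
--     cds = pos_pieces[0]['array']
--     first_non_number_word = pos_pieces[1]['array'][0]
--     quantity = None
--     if first_non_number_word in MAPPER:
--       quantity = ' '.join(cds + [first_non_number_word])
--       item_parts = pos_pieces[1]['array'][1:]
--       for rest in pos_pieces[2:]:
--         item_parts += rest['array']
--     else:
--       quantity = ' '.join(cds)
--       item_parts = []
--       for rest in pos_pieces[1:]:
--         item_parts += rest['array']
--     return quantity, ' '.join(item_parts)
-- ===== SOURCE B (Python) =====
-- MAPPER = {}
--
-- def process_pos(array):
--     if len(array) == 1:
--         return None, array[0]
--     if len(array) == 2: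
--         return array[0], array[1]
--     # one linear scan: prefix sharing the first position is the quantity, the rest is the item
--     p0 = array[0][1]
--     k = 0
--     while k < len(array) and array[k][1] == p0:
--         k += 1
--     head = [w for w, _ in array[:k]]
--     tail = [w for w, _ in array[k:]]
--     if tail and tail[0] in MAPPER:
--         head.append(tail[0])
--         tail = tail[1:]
--     return ' '.join(head), ' '.join(tail)
-- ===== Notes on version B (the rewrite author's own statement) =====
-- stated objective: simpler
-- what changed: Drops the order_array dict-grouping pass entirely: B scans once for the length of the prefix sharing the first position and splits the word list there, instead of building a list of {'pos','array'} group dicts and re-concatenating their arrays.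
-- outside the precondition, e.g. on process_pos([('a', '1')]): A returns (None, ('a', '1')), B returns (None, ('a', '1'))
-- crash fix: On arrays of length >= 3 whose positions are all equal, A raises IndexError (pos_pieces[1] does not exist); B returns (all words joined, ''). — e.g. on process_pos([("a", "1"), ("b", "1"), ("c", "1")]): A raises IndexError, B returns (some "a b c", "")
import Mathlib
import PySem

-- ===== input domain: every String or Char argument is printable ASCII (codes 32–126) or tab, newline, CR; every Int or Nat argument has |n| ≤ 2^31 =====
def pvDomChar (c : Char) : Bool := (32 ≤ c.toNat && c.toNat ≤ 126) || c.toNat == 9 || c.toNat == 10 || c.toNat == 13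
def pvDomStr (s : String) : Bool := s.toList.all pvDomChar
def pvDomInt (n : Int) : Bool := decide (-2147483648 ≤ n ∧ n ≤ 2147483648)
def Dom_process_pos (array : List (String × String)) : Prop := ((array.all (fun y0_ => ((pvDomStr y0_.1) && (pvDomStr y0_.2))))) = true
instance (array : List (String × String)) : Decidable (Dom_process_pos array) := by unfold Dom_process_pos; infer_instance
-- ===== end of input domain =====

-- B replaces A's order_array grouping pass (list of {'pos','array'} dicts, re-concatenated)
-- by one scan for the prefix sharing the first position; objective: simpler.
-- Equivalence is about the RETURN value on Pre_ (length ≥ 3 with at least two distinct positions).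

-- ===== PORT A =====

-- MAPPER = {} (module constant)
def pvMAPPER : PySem.Dict String String := PySem.Dict.empty

-- the loop body of order_array: state = (holder, temp) with temp = (pos, words)
def pvOAStep (st : List (Option String × List String) × (Option String × List String))
    (inst : String × String) : List (Option String × List String) × (Option String × List String) :=
  if some inst.2 ≠ st.2.1 then (st.1 ++ [st.2], (some inst.2, [inst.1]))
  else (st.1, (st.2.1, st.2.2 ++ [inst.1]))

def pvOrderArray (array : List (String × String)) : List (Option String × List String) :=
  let fin := array.foldl pvOAStep ([], (none, []))
  (fin.1 ++ [fin.2]).drop 1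

def process_pos (array : List (String × String)) : Option String × String :=
  if array.length = 1 then (none, "")        -- Python returns (None, array[0]) : not of the declared type; outside Pre_
  else if array.length = 2 then (none, "")   -- Python returns (array[0], array[1]) : not of the declared type; outside Pre_
  else
    match pvOrderArray array with
    | g0 :: g1 :: rest =>
      let cds := g0.2
      let fw := g1.2.headI                   -- pos_pieces[1]['array'][0]; nonempty whenever this branch is reached
      if (pvMAPPER.get? fw).isSome then
        (some (PySem.Str.join " " (cds ++ [fw])),
         PySem.Str.join " " (rest.foldl (fun acc g => acc ++ g.2) (g1.2.drop 1)))
      else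
        (some (PySem.Str.join " " cds),
         PySem.Str.join " " ((g1 :: rest).foldl (fun acc g => acc ++ g.2) []))
    | _ => (none, "")                        -- Python raises IndexError here; outside Pre_

-- ===== PORT B =====

def process_pos_alt (array : List (String × String)) : Option String × String :=
  if array.length = 1 then (none, "")        -- Source B returns (None, array[0]) : not of the declared type; outside Pre_
  else if array.length = 2 then (none, "")   -- Source B returns (array[0], array[1]) : not of the declared type; outside Pre_
  else
    match array with
    | [] => (none, "")                       -- Source B raises IndexError on []; outside Pre_
    | x :: _ =>
      let p0 := x.2
      let k := (array.takeWhile (fun y => y.2 == p0)).length   -- the while-loop counts the prefix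
      let head := (array.take k).map Prod.fst
      let tail := (array.drop k).map Prod.fst
      match tail with
      | t0 :: trest =>
        if (pvMAPPER.get? t0).isSome then
          (some (PySem.Str.join " " (head ++ [t0])), PySem.Str.join " " trest)
        else
          (some (PySem.Str.join " " head), PySem.Str.join " " tail)
      | [] => (some (PySem.Str.join " " head), PySem.Str.join " " ([] : List String))

-- ===== PRECONDITION & SPEC =====
-- Pre_ excludes: length 1 and 2, where A returns tuples containing (String × String) pairs — values not of the
-- declared type Option String × String; and length 0 / all-positions-equal inputs, where A raises IndexError.
def Pre_process_pos (array : List (String × String)) : Prop :=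
  3 ≤ array.length ∧ ∃ x ∈ array, x.2 ≠ array.headI.2
instance (array : List (String × String)) : Decidable (Pre_process_pos array) := by
  unfold Pre_process_pos; infer_instance

def pvWitness_process_pos : (List (String × String)) := [("a", "1"), ("b", "1"), ("c", "2")]

-- On arrays of length ≥ 3 whose positions are all equal, A raises IndexError (pos_pieces[1] does not exist); B returns (all words joined, '').
def Raises_process_pos (array : List (String × String)) : Prop :=
  3 ≤ array.length ∧ ∀ x ∈ array, x.2 = array.headI.2
instance (array : List (String × String)) : Decidable (Raises_process_pos array) := by
  unfold Raises_process_pos; infer_instance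
def pvRaiseWitness_process_pos : (List (String × String)) := [("a", "1"), ("b", "1"), ("c", "1")]
def pvRaiseWitnessOut_process_pos : Option String × String := (some "a b c", "")

def Spec_process_pos (array : List (String × String)) (out : Option String × String) : Prop := out = process_pos_alt array
instance (array : List (String × String)) (out : Option String × String) : Decidable (Spec_process_pos array out) := by unfold Spec_process_pos; infer_instance

-- ===== CLAIM (what is proved, stated in full; the proofs are below) =====
def Claim_equal_process_pos : Prop := ∀ (array : List (String × String)), Dom_process_pos array → Pre_process_pos array → Spec_process_pos array (process_pos array)
def Claim_raises_process_pos : Prop := (∀ (array : List (String × String)), Dom_process_pos array → Raises_process_pos array → ¬ Pre_process_pos array) ∧ (Dom_process_pos (pvRaiseWitness_process_pos) ∧ Raises_process_pos (pvRaiseWitness_process_pos) ∧ process_pos_alt (pvRaiseWitness_process_pos) = pvRaiseWitnessOut_process_pos)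

-- ===== LEMMAS AND PROOFS =====

-- consecutive-grouping recursion equivalent to A's foldl (proof helper)
def pvChunk (p : String) (ws : List String) :
    List (String × String) → List (Option String × List String) × (Option String × List String)
  | [] => ([], (some p, ws))
  | y :: l =>
    if y.2 == p then pvChunk p (ws ++ [y.1]) l
    else
      let r := pvChunk y.2 [y.1] l
      ((some p, ws) :: r.1, r.2)

theorem pvFoldl_chunk (l : List (String × String)) :
    ∀ (p : String) (ws : List String) (holder : List (Option String × List String)),
    l.foldl pvOAStep (holder, (some p, ws)) =
      (holder ++ (pvChunk p ws l).1, (pvChunk p ws l).2) := by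
  induction l with
  | nil => intro p ws holder; simp [pvChunk]
  | cons y l ih =>
    intro p ws holder
    by_cases h : y.2 = p
    · simp [List.foldl_cons, pvOAStep, h, pvChunk, ih]
    · simp [List.foldl_cons, pvOAStep, h, pvChunk, ih]

theorem pvOrderArray_cons (x : String × String) (l : List (String × String)) :
    pvOrderArray (x :: l) =
      (pvChunk x.2 [x.1] l).1 ++ [(pvChunk x.2 [x.1] l).2] := by
  simp [pvOrderArray, List.foldl_cons, pvOAStep, pvFoldl_chunk]

-- the words of all groups, in order, are the input words
theorem pvChunk_flat (l : List (String × String)) :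
    ∀ (p : String) (ws : List String),
    ((pvChunk p ws l).1.map Prod.snd).flatten ++ (pvChunk p ws l).2.2 =
      ws ++ l.map Prod.fst := by
  induction l with
  | nil => intro p ws; simp [pvChunk]
  | cons y l ih =>
    intro p ws
    by_cases h : y.2 = p
    · have hb : (y.2 == p) = true := by simp [h]
      simp only [pvChunk, hb, if_true]
      rw [ih]; simp
    · have hb : (y.2 == p) = false := by simp [h]
      simp only [pvChunk, hb, Bool.false_eq_true, if_false]
      simp only [List.map_cons, List.flatten_cons, List.append_assoc]
      rw [ih]; simp

-- splitting the first group off pvChunk when a different position occurs later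
theorem pvChunk_split (l : List (String × String)) :
    ∀ (p : String) (ws : List String) (y : String × String) (d : List (String × String)),
    l.dropWhile (fun z => z.2 == p) = y :: d →
    (pvChunk p ws l).1 ++ [(pvChunk p ws l).2] =
      (some p, ws ++ (l.takeWhile (fun z => z.2 == p)).map Prod.fst) ::
        ((pvChunk y.2 [y.1] d).1 ++ [(pvChunk y.2 [y.1] d).2]) := by
  induction l with
  | nil => intro p ws y d h; simp at h
  | cons z l ih =>
    intro p ws y d h
    by_cases hz : z.2 = p
    · have hzb : (z.2 == p) = true := by simp [hz]
      simp only [List.dropWhile_cons, hzb, if_true] at h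
      simp only [List.takeWhile_cons, hzb, if_true]
      simp only [pvChunk, hzb, if_true]
      rw [ih _ _ _ _ h]
      simp
    · have hzb : (z.2 == p) = false := by simp [hz]
      simp only [List.dropWhile_cons, hzb, Bool.false_eq_true, if_false] at h
      obtain ⟨rfl, rfl⟩ : z = y ∧ l = d := by
        injection h with h1 h2; exact ⟨h1, h2⟩
      simp only [List.takeWhile_cons, hzb, Bool.false_eq_true, if_false]
      simp [pvChunk, hzb]

theorem pvGet_empty (s : String) : pvMAPPER.get? s = none := rfl

theorem pvFoldl_app (gs : List (Option String × List String)) :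
    ∀ acc : List String,
    gs.foldl (fun acc g => acc ++ g.2) acc = acc ++ (gs.map Prod.snd).flatten := by
  induction gs with
  | nil => intro acc; simp
  | cons g gs ih => intro acc; simp [List.foldl_cons, ih]

theorem process_pos_spec : Claim_equal_process_pos := by
  intro array _ hpre
  obtain ⟨hlen, z, hz, hzne⟩ := hpre
  match array with
  | [] => simp at hlen
  | x :: l =>
    have hzx : z.2 ≠ x.2 := by simpa using hzne
    -- the dropWhile tail is nonempty
    have hd : l.dropWhile (fun y => y.2 == x.2) ≠ [] := by
      intro hnil
      rcases List.mem_cons.mp hz with rfl | hz'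
      · exact hzx rfl
      · exact hzx (by simpa using List.dropWhile_eq_nil_iff.mp hnil z hz')
    obtain ⟨y, d, hyd⟩ := List.exists_cons_of_ne_nil hd
    have hlen' : 3 ≤ l.length + 1 := by simpa using hlen
    have hlen1 : (x :: l).length ≠ 1 := by simp only [List.length_cons]; omega
    have hlen2 : (x :: l).length ≠ 2 := by simp only [List.length_cons]; omega
    show Spec_process_pos _ _
    unfold Spec_process_pos process_pos process_pos_alt
    rw [if_neg hlen1, if_neg hlen2, if_neg hlen1, if_neg hlen2]
    have hOA : pvOrderArray (x :: l) =
        (some x.2, x.1 :: (l.takeWhile (fun z => z.2 == x.2)).map Prod.fst) ::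
          ((pvChunk y.2 [y.1] d).1 ++ [(pvChunk y.2 [y.1] d).2]) := by
      rw [pvOrderArray_cons, pvChunk_split l x.2 [x.1] y d hyd]; simp
    rcases hE : (pvChunk y.2 [y.1] d).1 ++ [(pvChunk y.2 [y.1] d).2] with _ | ⟨g1, rest⟩
    · simp at hE
    · have hflat : g1.2 ++ (rest.map Prod.snd).flatten = y.1 :: d.map Prod.fst := by
        have := pvChunk_flat d y.2 [y.1]
        rw [show ((pvChunk y.2 [y.1] d).1.map Prod.snd).flatten ++ (pvChunk y.2 [y.1] d).2.2
              = (((pvChunk y.2 [y.1] d).1 ++ [(pvChunk y.2 [y.1] d).2]).map Prod.snd).flatten by simp] at this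
        rw [hE] at this
        simpa using this
      rw [hE] at hOA
      -- take/drop of the while-loop prefix
      have htw : (x :: l).takeWhile (fun y => y.2 == x.2) = x :: l.takeWhile (fun y => y.2 == x.2) := by
        simp
      have htake : l.take (l.takeWhile (fun y => y.2 == x.2)).length = l.takeWhile (fun y => y.2 == x.2) := by
        have h := List.take_left (l₁ := l.takeWhile (fun y => y.2 == x.2)) (l₂ := l.dropWhile (fun y => y.2 == x.2))
        rwa [List.takeWhile_append_dropWhile] at h
      have hdrop : l.drop (l.takeWhile (fun y => y.2 == x.2)).length = l.dropWhile (fun y => y.2 == x.2) := by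
        have h := List.drop_left (l₁ := l.takeWhile (fun y => y.2 == x.2)) (l₂ := l.dropWhile (fun y => y.2 == x.2))
        rwa [List.takeWhile_append_dropWhile] at h
      simp only [hOA, htw, List.length_cons, List.take_succ_cons, List.drop_succ_cons,
        htake, hdrop, hyd, List.map_cons, pvGet_empty, Option.isSome_none,
        Bool.false_eq_true, if_false, pvFoldl_app]
      simp [hflat]

@[simp]
theorem process_pos_raises : Claim_raises_process_pos := by
  unfold Claim_raises_process_pos
  constructor
  · intro array _ hr hp
    obtain ⟨_, hall⟩ := hr
    obtain ⟨_, z, hz, hzne⟩ := hp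
    exact hzne (hall z hz)
  · exact ⟨by decide, by decide, by decide⟩
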